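-- pv_equiv track=rewrite | github.com/mattBungate/truckDroneDelivery | functions.py | tour_nodes
-- ===== SOURCE A (Python) =====
-- def tour_nodes(start, active_arcs, nodes):
--     for i in active_arcs:
--         if start == i[0]:
--             if i[1] in nodes:
--                 return nodes
--             else:
--                 nodes.append(i[1])
--                 return tour_nodes(i[1], active_arcs, nodes)
-- ===== SOURCE B (Python) =====
-- def tour_nodes(start, active_arcs, nodes):
--     # Build a first-match successor index once, then follow it iteratively.
--     succ = {}
--     for s, t in active_arcs:
--         if s not in succ:
--             succ[s] = t
--     cur = start
--     while cur in succ: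
--         t = succ[cur]
--         if t in nodes:
--             return nodes
--         nodes.append(t)
--         cur = t
--     return None
-- ===== Notes on version B (the rewrite author's own statement) =====
-- stated objective: alternative
-- what changed: Replaces the recursion that rescans active_arcs from the top on every step with a first-match successor dict built once and then followed iteratively, so the per-step arc scan becomes a dict lookup.
import Mathlib
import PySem

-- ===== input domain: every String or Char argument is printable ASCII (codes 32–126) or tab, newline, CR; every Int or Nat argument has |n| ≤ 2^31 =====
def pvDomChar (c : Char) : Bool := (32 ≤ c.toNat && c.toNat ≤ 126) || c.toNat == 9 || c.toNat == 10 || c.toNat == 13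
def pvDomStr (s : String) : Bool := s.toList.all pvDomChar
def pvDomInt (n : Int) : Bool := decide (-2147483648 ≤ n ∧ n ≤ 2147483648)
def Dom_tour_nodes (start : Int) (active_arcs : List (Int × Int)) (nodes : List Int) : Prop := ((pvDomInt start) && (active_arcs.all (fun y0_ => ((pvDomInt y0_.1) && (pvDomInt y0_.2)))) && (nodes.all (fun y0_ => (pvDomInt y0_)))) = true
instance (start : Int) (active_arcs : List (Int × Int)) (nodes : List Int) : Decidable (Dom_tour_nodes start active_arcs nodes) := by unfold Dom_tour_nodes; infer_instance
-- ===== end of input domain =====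

-- B replaces A's per-step rescan of active_arcs with a first-match successor dict built once, then followed iteratively (return-value equivalence; in Python both A and B append the visited targets to `nodes` in place identically).
-- ===== PORT A =====
-- A's for-loop: scan active_arcs for the first arc whose source equals start
def pvFindArc (start : Int) : List (Int × Int) → Option (Int × Int)
  | [] => none
  | i :: rest => if start = i.1 then some i else pvFindArc start rest

-- needed by the ports' decreasing_by proofs (cited there by name)
theorem pvFindArc_mem {start : Int} {arcs : List (Int × Int)} {i : Int × Int}
    (h : pvFindArc start arcs = some i) : i ∈ arcs := by
  induction arcs with
  | nil => simp [pvFindArc] at h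
  | cons a rest ih =>
    simp only [pvFindArc] at h
    split at h
    · simp_all
    · exact List.mem_cons_of_mem _ (ih h)

theorem pvFilter_length_lt (l : List Int) (p : Int → Bool) (x : Int)
    (hx : x ∈ l) (hp : p x = false) : (l.filter p).length < l.length := by
  induction l with
  | nil => simp at hx
  | cons a l ih =>
    rcases List.mem_cons.mp hx with rfl | hx2
    · have h0 := List.length_filter_le p l
      rw [List.filter_cons, hp]
      simp
      omega
    · have h1 := ih hx2
      by_cases hpa : p a = true
      · rw [List.filter_cons, hpa]
        simp only [if_true, List.length_cons]
        omega
      · rw [Bool.not_eq_true] at hpa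
        rw [List.filter_cons, hpa]
        simp
        omega

-- termination measure for both ports: arc targets not yet visited shrink
theorem pvMeasure_lt (l : List Int) (nodes : List Int) (t : Int)
    (ht : t ∈ l) (hn : t ∉ nodes) :
    (l.filter (fun x => decide (x ∉ nodes ++ [t]))).length
      < (l.filter (fun x => decide (x ∉ nodes))).length := by
  have hsub : l.filter (fun x => decide (x ∉ nodes ++ [t]))
      = (l.filter (fun x => decide (x ∉ nodes))).filter (fun x => decide (x ≠ t)) := by
    rw [List.filter_filter]
    apply List.filter_congr
    intro x _
    by_cases h1 : x ∈ nodes <;> by_cases h2 : x = t <;> simp [h1, h2]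
  have hmem : t ∈ l.filter (fun x => decide (x ∉ nodes)) :=
    List.mem_filter.mpr ⟨ht, by simp [hn]⟩
  rw [hsub]
  exact pvFilter_length_lt _ _ t hmem (by simp)

def tour_nodes (start : Int) (active_arcs : List (Int × Int)) (nodes : List Int) : Option (List Int) :=
  match h : pvFindArc start active_arcs with
  | none => none
  | some i =>
      if i.2 ∈ nodes then some nodes
      else tour_nodes i.2 active_arcs (nodes ++ [i.2])
termination_by ((active_arcs.map Prod.snd).filter (fun x => decide (x ∉ nodes))).length
decreasing_by
  exact pvMeasure_lt _ nodes i.2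
    (List.mem_map.mpr ⟨i, pvFindArc_mem h, rfl⟩) (by assumption)

-- ===== PORT B =====
-- B's dict-building loop: first arc per source wins ("if s not in succ: succ[s] = t")
def pvBuildSucc (active_arcs : List (Int × Int)) : PySem.Dict Int Int :=
  active_arcs.foldl (fun d p => if d.contains p.1 then d else d.insert p.1 p.2) PySem.Dict.empty

-- needed by pvFollow's decreasing_by proof (cited there by name)
theorem pvFollow_mem_values {succ : PySem.Dict Int Int} {cur t : Int}
    (h : succ.get? cur = some t) : t ∈ succ.values := by
  have hm := PySem.Dict.mem_items_of_get?_eq_some succ h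
  unfold PySem.Dict.values
  exact List.mem_map.mpr ⟨(cur, t), hm, rfl⟩

-- B's while loop: follow the successor index until a repeat or a dead end
def pvFollow (succ : PySem.Dict Int Int) (cur : Int) (nodes : List Int) : Option (List Int) :=
  match h : succ.get? cur with
  | none => none
  | some t =>
      if t ∈ nodes then some nodes
      else pvFollow succ t (nodes ++ [t])
termination_by ((succ.values).filter (fun x => decide (x ∉ nodes))).length
decreasing_by
  exact pvMeasure_lt _ nodes t (pvFollow_mem_values h) (by assumption)

def tour_nodes_alt (start : Int) (active_arcs : List (Int × Int)) (nodes : List Int) : Option (List Int) :=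
  pvFollow (pvBuildSucc active_arcs) start nodes

-- ===== PRECONDITION & SPEC =====
def Spec_tour_nodes (start : Int) (active_arcs : List (Int × Int)) (nodes : List Int) (out : Option (List Int)) : Prop := out = tour_nodes_alt start active_arcs nodes
instance (start : Int) (active_arcs : List (Int × Int)) (nodes : List Int) (out : Option (List Int)) : Decidable (Spec_tour_nodes start active_arcs nodes out) := by unfold Spec_tour_nodes; infer_instance

-- ===== CLAIM (what is proved, stated in full; the proofs are below) =====
def Claim_equal_tour_nodes : Prop := ∀ (start : Int) (active_arcs : List (Int × Int)) (nodes : List Int), Dom_tour_nodes start active_arcs nodes → Spec_tour_nodes start active_arcs nodes (tour_nodes start active_arcs nodes)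

-- ===== LEMMAS AND PROOFS =====

-- the dict built by pvBuildSucc looks up exactly the first matching arc's target
theorem pvBuildSucc_get?_aux (arcs : List (Int × Int)) (d : PySem.Dict Int Int) (x : Int) :
    (arcs.foldl (fun d p => if d.contains p.1 then d else d.insert p.1 p.2) d).get? x
      = (d.get? x).or ((pvFindArc x arcs).map Prod.snd) := by
  induction arcs generalizing d with
  | nil => simp [pvFindArc]
  | cons p rest ih =>
    obtain ⟨s, t⟩ := p
    simp only [List.foldl_cons]
    rw [ih]
    rcases eq_or_ne x s with rfl | hne
    · by_cases hc : d.contains x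
      · have hsome : (d.get? x).isSome = true := by
          rw [← PySem.Dict.contains_eq_isSome_get?]; exact hc
        rcases Option.isSome_iff_exists.mp hsome with ⟨v, hv⟩
        simp [pvFindArc, hc, hv]
      · have hs : (d.get? x).isSome = false := by
          rw [← PySem.Dict.contains_eq_isSome_get?]; simpa using hc
        have hnone : d.get? x = none := Option.not_isSome_iff_eq_none.mp (by simp [hs])
        simp [pvFindArc, hc, hnone, PySem.Dict.get?_insert_self]
    · by_cases hc : d.contains s <;>
        simp [pvFindArc, hc, PySem.Dict.get?_insert_of_ne d t hne, hne]

theorem pvBuildSucc_get? (arcs : List (Int × Int)) (x : Int) :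
    (pvBuildSucc arcs).get? x = (pvFindArc x arcs).map Prod.snd := by
  simp [pvBuildSucc, pvBuildSucc_get?_aux, PySem.Dict.get?_empty]

theorem tour_nodes_eq_alt (start : Int) (active_arcs : List (Int × Int)) (nodes : List Int) :
    tour_nodes start active_arcs nodes = tour_nodes_alt start active_arcs nodes := by
  unfold tour_nodes_alt
  fun_induction tour_nodes start active_arcs nodes with
  | case1 s ns h =>
    rw [pvFollow]
    split
    · rfl
    · next t heq => simp [pvBuildSucc_get?, h] at heq
  | case2 s ns i h hmem =>
    rw [pvFollow]
    split
    · next heq => simp [pvBuildSucc_get?, h] at heq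
    · next t heq =>
      rw [pvBuildSucc_get?, h] at heq
      simp only [Option.map_some, Option.some.injEq] at heq
      subst heq
      rw [if_pos hmem]
  | case3 s ns i h hmem ih =>
    rw [pvFollow]
    split
    · next heq => simp [pvBuildSucc_get?, h] at heq
    · next t heq =>
      rw [pvBuildSucc_get?, h] at heq
      simp only [Option.map_some, Option.some.injEq] at heq
      subst heq
      rw [if_neg hmem]
      exact ih

-- ===== VERDICT (by name: the statement is the Claim_ definition above) =====
theorem tour_nodes_spec : Claim_equal_tour_nodes := by
  intro start arcs nodes _
  unfold Spec_tour_nodes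
  exact tour_nodes_eq_alt start arcs nodes
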